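-- pv_equiv track=rewrite | github.com/campsight/adventofcode2019 | Day10/solution_day10.py | check_in_between
-- ===== SOURCE A (Python) =====
-- def isBetween(a, b, c):
--     crossproduct = (c[1] - a[1]) * (b[0] - a[0]) - (c[0] - a[0]) * (b[1] - a[1])
--     # compare versus epsilon for floating point values, or != 0 if using integers
--     # if abs(crossproduct) > epsilon:
--     if abs(crossproduct) > 0:
--         return False
--     return True
--
-- def check_in_between(a, b, subset, y_offset):
--     for cib_y in range(len(subset)):
--         for cib_x in subset[cib_y]:
--             real_y = cib_y + y_offset
--             if ((cib_x != a[0]) or (real_y != a[1])) and ((cib_x != b[0]) or (real_y != b[1])):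
--                 if isBetween(a, b, [cib_x, real_y]):
--                     return True
--     return False
-- ===== SOURCE B (Python) =====
-- def check_in_between(a, b, subset, y_offset):
--     ax, ay = a[0], a[1]
--     bx, by = b[0], b[1]
--     dx, dy = bx - ax, by - ay
--     for i, row in enumerate(subset):
--         y = i + y_offset
--         if dy == 0:
--             # collinear iff (y - ay) * dx == 0: the whole row qualifies or none of it
--             if (y - ay) * dx == 0:
--                 for x in row:
--                     if not ((x == ax and y == ay) or (x == bx and y == by)):
--                         return True
--         else:
--             # collinear iff (x - ax) * dy == (y - ay) * dx: at most one x per row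
--             num = (y - ay) * dx
--             if num % dy == 0:
--                 x = ax + num // dy
--                 if x in row and not ((x == ax and y == ay) or (x == bx and y == by)):
--                     return True
--     return False
-- ===== Notes on version B (the rewrite author's own statement) =====
-- stated objective: alternative
-- what changed: Instead of testing the cross product for every x of every row, B solves the collinearity equation once per row: for dy != 0 there is at most one candidate x per row (exact division, then a membership test), and for dy == 0 a whole row qualifies or none of it.
-- outside the precondition, e.g. on check_in_between([], [], [[]], 0): A returns False, B raises IndexError
import Mathlib
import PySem

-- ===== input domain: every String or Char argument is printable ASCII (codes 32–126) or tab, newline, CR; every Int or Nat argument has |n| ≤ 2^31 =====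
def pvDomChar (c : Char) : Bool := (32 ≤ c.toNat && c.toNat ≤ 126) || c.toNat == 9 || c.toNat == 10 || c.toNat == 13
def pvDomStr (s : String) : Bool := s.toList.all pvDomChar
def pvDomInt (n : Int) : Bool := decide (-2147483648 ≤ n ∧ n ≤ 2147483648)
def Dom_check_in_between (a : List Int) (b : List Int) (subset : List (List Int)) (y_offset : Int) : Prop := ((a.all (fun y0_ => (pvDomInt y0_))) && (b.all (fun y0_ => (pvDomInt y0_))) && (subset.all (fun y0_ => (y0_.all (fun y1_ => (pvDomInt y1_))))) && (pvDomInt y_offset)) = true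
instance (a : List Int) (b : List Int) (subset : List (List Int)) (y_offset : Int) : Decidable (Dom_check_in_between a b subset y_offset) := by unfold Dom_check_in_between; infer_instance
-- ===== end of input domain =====

-- B replaces A's scan of every point of every row by solving the collinearity
-- equation per row (one candidate x for dy ≠ 0, all-or-nothing for dy = 0).
-- ===== PORT A =====
def isBetween (a : List Int) (b : List Int) (c : List Int) : Bool :=
  let crossproduct :=
    (PySem.List.pyGetD c 1 0 - PySem.List.pyGetD a 1 0) * (PySem.List.pyGetD b 0 0 - PySem.List.pyGetD a 0 0)
      - (PySem.List.pyGetD c 0 0 - PySem.List.pyGetD a 0 0) * (PySem.List.pyGetD b 1 0 - PySem.List.pyGetD a 1 0)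
  if |crossproduct| > 0 then false else true

def check_in_between (a : List Int) (b : List Int) (subset : List (List Int)) (y_offset : Int) : Bool :=
  (PySem.List.pyRange 0 subset.length 1).any fun cib_y =>
    (PySem.List.pyGetD subset cib_y []).any fun cib_x =>
      let real_y := cib_y + y_offset
      (((cib_x != PySem.List.pyGetD a 0 0) || (real_y != PySem.List.pyGetD a 1 0))
        && ((cib_x != PySem.List.pyGetD b 0 0) || (real_y != PySem.List.pyGetD b 1 0)))
        && isBetween a b [cib_x, real_y]

-- ===== PORT B =====
def rowHit (ax ay bx byv y : Int) (row : List Int) : Bool :=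
  let dx := bx - ax
  let dy := byv - ay
  if dy == 0 then
    if (y - ay) * dx == 0 then
      row.any fun x => !((x == ax && y == ay) || (x == bx && y == byv))
    else false
  else
    let num := (y - ay) * dx
    if PySem.Int.mod num dy == 0 then
      let x := ax + PySem.Int.floordiv num dy
      row.contains x && !((x == ax && y == ay) || (x == bx && y == byv))
    else false

def check_in_between_alt (a : List Int) (b : List Int) (subset : List (List Int)) (y_offset : Int) : Bool :=
  let ax := PySem.List.pyGetD a 0 0
  let ay := PySem.List.pyGetD a 1 0
  let bx := PySem.List.pyGetD b 0 0
  let byv := PySem.List.pyGetD b 1 0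
  (PySem.List.enumerate subset 0).any fun p => rowHit ax ay bx byv (p.1 + y_offset) p.2

-- ===== PRECONDITION & SPEC =====
-- Pre_ excludes inputs where a or b has fewer than 2 coordinates: Python A indexes
-- a[0], a[1], b[0], b[1] and raises IndexError as soon as subset holds any point
-- (and B, which destructures a and b up front, raises there on every subset).
def Pre_check_in_between (a : List Int) (b : List Int) (subset : List (List Int)) (y_offset : Int) : Prop :=
  2 ≤ a.length ∧ 2 ≤ b.length
instance (a : List Int) (b : List Int) (subset : List (List Int)) (y_offset : Int) : Decidable (Pre_check_in_between a b subset y_offset) := by unfold Pre_check_in_between; infer_instance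
def pvWitness_check_in_between : List Int × List Int × List (List Int) × Int := ([0, 0], [2, 2], [[1], [3]], 1)
def Spec_check_in_between (a : List Int) (b : List Int) (subset : List (List Int)) (y_offset : Int) (out : Bool) : Prop := out = check_in_between_alt a b subset y_offset
instance (a : List Int) (b : List Int) (subset : List (List Int)) (y_offset : Int) (out : Bool) : Decidable (Spec_check_in_between a b subset y_offset out) := by unfold Spec_check_in_between; infer_instance

-- ===== CLAIM (what is proved, stated in full; the proofs are below) =====
def Claim_equal_check_in_between : Prop := ∀ (a : List Int) (b : List Int) (subset : List (List Int)) (y_offset : Int), Dom_check_in_between a b subset y_offset → Pre_check_in_between a b subset y_offset → Spec_check_in_between a b subset y_offset (check_in_between a b subset y_offset)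

-- ===== LEMMAS AND PROOFS =====

theorem excl_bool (x ax y ay bx byv : Int) :
    (((x != ax) || (y != ay)) && ((x != bx) || (y != byv)))
      = !((x == ax && y == ay) || (x == bx && y == byv)) := by
  simp [bne, Bool.not_or, Bool.not_and]

theorem any_eq_contains (x0 : Int) (g : Int → Bool) (row : List Int) :
    (row.any fun x => (x == x0) && g x) = (row.contains x0 && g x0) := by
  induction row with
  | nil => rfl
  | cons h t ih =>
    by_cases hx : h = x0
    · subst hx; simp [List.any_cons, ih]
    · have hx' : ¬ x0 = h := fun e => hx e.symm
      simp [List.any_cons, ih, hx, hx']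

theorem row_lemma (ax ay bx byv y : Int) (row : List Int) :
    (row.any fun x =>
      ((((x != ax) || (y != ay)) && ((x != bx) || (y != byv)))
        && (if |(y - ay) * (bx - ax) - (x - ax) * (byv - ay)| > 0 then false else true)))
    = rowHit ax ay bx byv y row := by
  unfold rowHit
  by_cases hdy : byv - ay = 0
  · rw [if_pos (by simpa using hdy)]
    by_cases hnum : (y - ay) * (bx - ax) = 0
    · rw [if_pos (by simpa using hnum)]
      refine List.any_congr rfl (fun x => ?_)
      have hc : (y - ay) * (bx - ax) - (x - ax) * (byv - ay) = 0 := by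
        rw [hdy, hnum]; ring
      rw [hc, if_neg (by simp), Bool.and_true, excl_bool]
    · rw [if_neg (by simpa using hnum)]
      simp only [List.any_eq_false]
      intro x _
      have h0 : (x - ax) * (byv - ay) = 0 := by rw [hdy]; ring
      have habs : |(y - ay) * (bx - ax) - (x - ax) * (byv - ay)| > 0 :=
        abs_pos.mpr (by omega)
      rw [if_pos habs, Bool.and_false]
      simp
  · rw [if_neg (by simpa using hdy)]
    by_cases hdvd : (byv - ay) ∣ (y - ay) * (bx - ax)
    · rw [if_pos (by simpa [PySem.Int.mod_eq_zero_iff_dvd] using hdvd)]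
      have hq : PySem.Int.floordiv ((y - ay) * (bx - ax)) (byv - ay) * (byv - ay)
          = (y - ay) * (bx - ax) := by
        have h1 := PySem.Int.floordiv_mul_add_mod ((y - ay) * (bx - ax)) (byv - ay)
        have h2 : PySem.Int.mod ((y - ay) * (bx - ax)) (byv - ay) = 0 :=
          (PySem.Int.mod_eq_zero_iff_dvd _ _).mpr hdvd
        omega
      set q := PySem.Int.floordiv ((y - ay) * (bx - ax)) (byv - ay) with hqdef
      have key : ∀ x : Int,
          (((((x != ax) || (y != ay)) && ((x != bx) || (y != byv)))
            && (if |(y - ay) * (bx - ax) - (x - ax) * (byv - ay)| > 0 then false else true)))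
          = ((x == ax + q) && !((x == ax && y == ay) || (x == bx && y == byv))) := by
        intro x
        by_cases hx : x = ax + q
        · have hxa : x - ax = q := by omega
          have hc : (y - ay) * (bx - ax) - (x - ax) * (byv - ay) = 0 := by
            rw [hxa, hq]; ring
          rw [hc, if_neg (by simp), Bool.and_true, excl_bool]
          simp [hx]
        · have hc : |(y - ay) * (bx - ax) - (x - ax) * (byv - ay)| > 0 := by
            refine abs_pos.mpr (fun h => hx ?_)
            have h2 : (x - ax) * (byv - ay) = q * (byv - ay) := by rw [hq]; omega
            have h3 := mul_right_cancel₀ hdy h2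
            omega
          rw [if_pos hc, Bool.and_false]
          simp [hx]
      rw [List.any_congr rfl key, any_eq_contains]
    · rw [if_neg (by simpa [PySem.Int.mod_eq_zero_iff_dvd] using hdvd)]
      simp only [List.any_eq_false]
      intro x _
      have hc : |(y - ay) * (bx - ax) - (x - ax) * (byv - ay)| > 0 :=
        abs_pos.mpr (fun h => hdvd ⟨x - ax, by linear_combination h⟩)
      rw [if_pos hc, Bool.and_false]
      simp

-- ===== VERDICT (by name: the statement is the Claim_ definition above) =====
theorem check_in_between_spec : Claim_equal_check_in_between := by
  intro a b subset y_offset _ _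
  unfold Spec_check_in_between
  simp only [check_in_between, check_in_between_alt, isBetween]
  rw [PySem.List.enumerate_eq_map_pyRange subset ([] : List Int), List.any_map]
  refine List.any_congr (by simp [PySem.List.len]) (fun j => ?_)
  simpa [Function.comp] using row_lemma (PySem.List.pyGetD a 0 0) (PySem.List.pyGetD a 1 0)
    (PySem.List.pyGetD b 0 0) (PySem.List.pyGetD b 1 0) (j + y_offset)
    (PySem.List.pyGetD subset j [])
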